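-- pv_equiv track=rewrite | github.com/Wilhelm-af/StarRupture-JunctionFixer | fix_all_junctions.py | detect_lane_axis
-- ===== SOURCE A (Python) =====
-- def detect_lane_axis(positions):
--     """
--     Given a list of (x, y) positions that are on the SAME FACE of a junction,
--     determine which axis separates the lanes.
--     """
--     if len(positions) < 2:
--         return 'x'
--     xs = [p[0] for p in positions]
--     ys = [p[1] for p in positions]
--     x_spread = max(xs) - min(xs)
--     y_spread = max(ys) - min(ys)
--     return 'x' if x_spread > y_spread else 'y'
-- ===== SOURCE B (Python) =====
-- def detect_lane_axis(positions):
--     """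
--     Given a list of (x, y) positions that are on the SAME FACE of a junction,
--     determine which axis separates the lanes.
--     Sort-based version: spread of an axis = last - first of its sorted coordinates.
--     """
--     if len(positions) < 2:
--         return 'x'
--     xs = sorted(p[0] for p in positions)
--     ys = sorted(p[1] for p in positions)
--     return 'x' if xs[-1] - xs[0] > ys[-1] - ys[0] else 'y'
-- ===== Notes on version B (the rewrite author's own statement) =====
-- stated objective: alternative
-- what changed: Replaces the four max()/min() scans by sorting each coordinate list once and reading the spread off the sorted endpoints (last minus first).
import Mathlib
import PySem

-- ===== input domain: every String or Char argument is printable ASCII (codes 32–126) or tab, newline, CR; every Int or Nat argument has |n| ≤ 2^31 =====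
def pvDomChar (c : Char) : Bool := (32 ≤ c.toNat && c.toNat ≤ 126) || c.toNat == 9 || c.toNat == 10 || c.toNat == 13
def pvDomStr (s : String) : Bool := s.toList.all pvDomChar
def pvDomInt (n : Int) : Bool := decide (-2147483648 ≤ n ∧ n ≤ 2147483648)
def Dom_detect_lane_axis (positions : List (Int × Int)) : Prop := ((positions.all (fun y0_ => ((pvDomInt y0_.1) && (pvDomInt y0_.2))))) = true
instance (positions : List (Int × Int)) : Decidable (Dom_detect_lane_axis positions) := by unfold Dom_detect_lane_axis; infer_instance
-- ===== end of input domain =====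

-- B replaces A's four max()/min() scans by sorting each coordinate list and reading the spread off the sorted endpoints (objective: alternative algorithm).

-- ===== PORT A =====
def detect_lane_axis (positions : List (Int × Int)) : String :=
  if positions.length < 2 then "x"
  else
    let xs := positions.map (fun p => p.1)
    let ys := positions.map (fun p => p.2)
    match PySem.List.max? xs (fun v => v), PySem.List.min? xs (fun v => v),
          PySem.List.max? ys (fun v => v), PySem.List.min? ys (fun v => v) with
    | some mxx, some mnx, some mxy, some mny =>
        if mxx - mnx > mxy - mny then "x" else "y"
    | _, _, _, _ => "x"  -- unreachable: the lists are nonempty here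

-- ===== PORT B =====
def detect_lane_axis_alt (positions : List (Int × Int)) : String :=
  if positions.length < 2 then "x"
  else
    let xs := PySem.List.sorted (positions.map (fun p => p.1)) (fun v => v) false
    let ys := PySem.List.sorted (positions.map (fun p => p.2)) (fun v => v) false
    -- the four indexings, each handled separately (none is unreachable: the sorted lists are nonempty)
    match PySem.List.pyGet? xs (-1) with
    | none => "x"
    | some xl =>
      match PySem.List.pyGet? xs 0 with
      | none => "x"
      | some xf =>
        match PySem.List.pyGet? ys (-1) with
        | none => "x"
        | some yl =>
          match PySem.List.pyGet? ys 0 with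
          | none => "x"
          | some yf => if xl - xf > yl - yf then "x" else "y"

-- ===== PRECONDITION & SPEC =====
def Spec_detect_lane_axis (positions : List (Int × Int)) (out : String) : Prop := out = detect_lane_axis_alt positions
instance (positions : List (Int × Int)) (out : String) : Decidable (Spec_detect_lane_axis positions out) := by unfold Spec_detect_lane_axis; infer_instance

-- ===== CLAIM (what is proved, stated in full; the proofs are below) =====
def Claim_equal_detect_lane_axis : Prop := ∀ (positions : List (Int × Int)), Dom_detect_lane_axis positions → Spec_detect_lane_axis positions (detect_lane_axis positions)

-- ===== LEMMAS AND PROOFS =====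

-- In a ≤-pairwise list, every element is ≤ the last one.
theorem le_getLast_of_pairwise {s : List Int} (h : s.Pairwise (· ≤ ·)) (hne : s ≠ []) :
    ∀ y ∈ s, y ≤ s.getLast hne := by
  induction s with
  | nil => simp at hne
  | cons a t ih =>
    intro y hy
    rcases List.pairwise_cons.mp h with ⟨ha, ht⟩
    cases t with
    | nil => simp at hy; simp [hy, List.getLast]
    | cons b u =>
      have hlast : (a :: b :: u).getLast hne = (b :: u).getLast (by simp) := by
        simp [List.getLast]
      rw [hlast]
      rcases List.mem_cons.mp hy with rfl | hy'
      · exact le_trans (ha _ (List.getLast_mem _)) (le_refl _)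
      · exact ih ht (by simp) y hy'

-- The first element of sorted(l) is min(l), the last is max(l) (as A computes them).
theorem sorted_head_eq_min {x : Int} {t : List Int} {m : Int} {s : List Int}
    (hs : PySem.List.sorted (x :: t) (fun v => v) false = m :: s) :
    m = t.foldl min x := by
  have hmem : m ∈ x :: t := by
    rw [← PySem.List.mem_sorted (key := fun v => v) (rev := false), hs]; simp
  have hmin : ∀ y ∈ x :: t, m ≤ y := PySem.List.key_head_sorted_le _ _ hs
  have h1 := PySem.List.foldl_min_le t x
  rcases PySem.List.foldl_min_mem t x with he | he
  · exact le_antisymm (by rw [he]; exact hmin x (by simp)) (by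
      rcases List.mem_cons.mp hmem with rfl | hm
      · exact h1.1
      · exact h1.2 m hm)
  · exact le_antisymm (hmin _ (List.mem_cons_of_mem _ he)) (by
      rcases List.mem_cons.mp hmem with rfl | hm
      · exact h1.1
      · exact h1.2 m hm)

theorem sorted_last_eq_max {x : Int} {t : List Int} :
    (PySem.List.sorted (x :: t) (fun v => v) false).getLast?
      = some (t.foldl max x) := by
  set s := PySem.List.sorted (x :: t) (fun v => v) false with hs
  have hne : s ≠ [] := by
    rw [hs, Ne, PySem.List.sorted_eq_nil_iff]; simp
  have hperm : s.Perm (x :: t) := PySem.List.sorted_perm _ _ _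
  have hpw : s.Pairwise (fun a b => (fun v => v) a ≤ (fun v => v) b) :=
    PySem.List.sorted_pairwise _ _
  have hL := le_getLast_of_pairwise hpw hne
  have hLmem : s.getLast hne ∈ x :: t := hperm.mem_iff.mp (List.getLast_mem hne)
  have h1 := PySem.List.le_foldl_max t x
  have heq : s.getLast hne = t.foldl max x := by
    rcases PySem.List.foldl_max_mem t x with he | he
    · refine le_antisymm ?_ (by rw [he]; exact hL x (hperm.mem_iff.mpr (by simp)))
      rcases List.mem_cons.mp hLmem with h | h
      · rw [h]; exact h1.1
      · exact h1.2 _ h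
    · refine le_antisymm ?_ (hL _ (hperm.mem_iff.mpr (List.mem_cons_of_mem _ he)))
      rcases List.mem_cons.mp hLmem with h | h
      · rw [h]; exact h1.1
      · exact h1.2 _ h
  rw [List.getLast?_eq_some_getLast hne, heq]

theorem detect_lane_axis_spec : Claim_equal_detect_lane_axis := by
  unfold Claim_equal_detect_lane_axis
  intro positions _
  unfold Spec_detect_lane_axis
  by_cases hlen : positions.length < 2
  · simp [detect_lane_axis, detect_lane_axis_alt, hlen]
  · match positions, hlen with
    | (x0, y0) :: rest, hlen =>
      simp only [detect_lane_axis, detect_lane_axis_alt, List.map_cons, hlen]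
      have hxs : ∃ m s, PySem.List.sorted (x0 :: rest.map (fun p => p.1)) (fun v => v) false = m :: s := by
        rcases h : PySem.List.sorted (x0 :: rest.map (fun p => p.1)) (fun v => v) false with _ | ⟨m, s⟩
        · rw [PySem.List.sorted_eq_nil_iff] at h; simp at h
        · exact ⟨m, s, h⟩
      have hys : ∃ m s, PySem.List.sorted (y0 :: rest.map (fun p => p.2)) (fun v => v) false = m :: s := by
        rcases h : PySem.List.sorted (y0 :: rest.map (fun p => p.2)) (fun v => v) false with _ | ⟨m, s⟩
        · rw [PySem.List.sorted_eq_nil_iff] at h; simp at h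
        · exact ⟨m, s, h⟩
      rcases hxs with ⟨mx, sx, hx⟩
      rcases hys with ⟨my, sy, hy⟩
      rw [PySem.List.max?_id_cons, PySem.List.min?_id_cons,
          PySem.List.max?_id_cons, PySem.List.min?_id_cons]
      rw [PySem.List.pyGet?_neg_one, PySem.List.pyGet?_neg_one]
      rw [sorted_last_eq_max, sorted_last_eq_max, hx, hy,
          PySem.List.pyGet?_zero_cons, PySem.List.pyGet?_zero_cons]
      rw [sorted_head_eq_min hx, sorted_head_eq_min hy]
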